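-- pv_equiv track=rewrite | github.com/fullstuckdev/zicare-test-backend-engineer | 2. Logical test/sequenceExists.py | sequenceExists
-- ===== SOURCE A (Python) =====
-- def sequenceExists(main, seq):
--     # check if the sequence length is greater than the main array
--     if len(seq) > len(main):
--         return False
--
--     # loop through the main array and find the first element of the sequence
--     for i in range(len(main)):
--         if main[i] == seq[0]:
--             # if the first element is found, check if the rest of the sequence exists
--             if seq == main[i:i+len(seq)]:
--                 return True
--
--     # if the sequence is not found, return false
--     return False
-- ===== SOURCE B (Python) =====
-- def sequenceExists(main, seq):
--     # slide a window by repeatedly comparing the prefix and dropping the head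
--     n = len(seq)
--     while len(main) >= n:
--         if main[:n] == seq:
--             return True
--         main = main[1:]
--     return False
-- ===== Notes on version B (the rewrite author's own statement) =====
-- stated objective: alternative
-- what changed: B replaces A's index loop (first-element filter + full-slice comparison) by a head-dropping sliding-window loop that just compares the current prefix with seq.
-- outside the precondition, e.g. on sequenceExists([], []): A returns False, B returns True
import Mathlib
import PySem

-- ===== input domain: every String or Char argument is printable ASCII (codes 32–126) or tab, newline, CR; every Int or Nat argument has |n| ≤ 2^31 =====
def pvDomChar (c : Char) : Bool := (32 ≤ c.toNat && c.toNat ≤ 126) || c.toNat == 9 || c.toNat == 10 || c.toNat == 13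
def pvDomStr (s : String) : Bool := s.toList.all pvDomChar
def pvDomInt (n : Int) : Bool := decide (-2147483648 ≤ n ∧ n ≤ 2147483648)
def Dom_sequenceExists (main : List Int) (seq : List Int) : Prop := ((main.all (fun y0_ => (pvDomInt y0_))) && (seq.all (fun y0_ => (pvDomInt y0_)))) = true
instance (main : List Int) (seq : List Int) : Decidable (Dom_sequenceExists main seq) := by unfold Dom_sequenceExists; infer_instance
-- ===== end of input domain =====

-- B replaces A's index loop (first-element filter + slice comparison) by a
-- head-dropping sliding window comparing the current prefix with seq; same cost,
-- different structure. Equality proved for nonempty seq (A raises / its ([],[])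
-- value is accidental otherwise).

-- ===== PORT A =====
def sequenceExists (main : List Int) (seq : List Int) : Bool :=
  if (seq.length : Int) > (main.length : Int) then false
  else
    (PySem.List.pyRange 0 (main.length : Int) 1).foldl
      (fun acc i =>
        acc ||
          (if PySem.List.pyGet? main i == PySem.List.pyGet? seq 0 then
            seq == PySem.List.slice main (some i) (some (i + (seq.length : Int)))
          else false))
      false

-- ===== PORT B =====
-- the while loop of Source B: recursion on main, guard = loop condition
def seqAltLoop (seq : List Int) : List Int → Bool
  | [] => if seq.length ≤ 0 then (([] : List Int).take seq.length == seq) else false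
  | a :: t =>
      if seq.length ≤ t.length + 1 then
        (if (a :: t).take seq.length == seq then true else seqAltLoop seq t)
      else false

def sequenceExists_alt (main : List Int) (seq : List Int) : Bool :=
  seqAltLoop seq main

-- ===== PRECONDITION & SPEC =====
-- Pre_ excludes empty seq: there A raises IndexError (seq[0]) for nonempty main,
-- and on ([], []) A's False is an accident of the loop never running — a
-- defensible corner; B returns True there (the empty sequence occurs everywhere).
def Pre_sequenceExists (main : List Int) (seq : List Int) : Prop := seq ≠ []
instance (main : List Int) (seq : List Int) : Decidable (Pre_sequenceExists main seq) := by unfold Pre_sequenceExists; infer_instance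
def pvWitness_sequenceExists : List Int × List Int := ([1, 2, 3], [2, 3])

def Spec_sequenceExists (main : List Int) (seq : List Int) (out : Bool) : Prop := out = sequenceExists_alt main seq
instance (main : List Int) (seq : List Int) (out : Bool) : Decidable (Spec_sequenceExists main seq out) := by unfold Spec_sequenceExists; infer_instance

-- ===== CLAIM (what is proved, stated in full; the proofs are below) =====
def Claim_equal_sequenceExists : Prop := ∀ (main : List Int) (seq : List Int), Dom_sequenceExists main seq → Pre_sequenceExists main seq → Spec_sequenceExists main seq (sequenceExists main seq)

-- ===== LEMMAS AND PROOFS =====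

lemma foldl_or_any (p : Int → Bool) (l : List Int) (b : Bool) :
    l.foldl (fun acc i => acc || p i) b = (b || l.any p) := by
  induction l generalizing b with
  | nil => simp
  | cons a t ih => simp [List.foldl_cons, ih, Bool.or_assoc]

lemma take_drop_len {m ss : List Int} {s : Int} {k : Nat}
    (h : (m.drop k).take (ss.length + 1) = s :: ss) : ss.length + 1 + k ≤ m.length := by
  have := congrArg List.length h
  rw [List.length_take, List.length_drop, List.length_cons] at this
  omega

-- A = true ↔ some window matches (seq nonempty)
lemma A_iff (m : List Int) (s : Int) (ss : List Int) :
    sequenceExists m (s :: ss) = true ↔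
      ∃ k : Nat, k < m.length ∧ (m.drop k).take (ss.length + 1) = s :: ss := by
  set seq := s :: ss with hseq
  constructor
  · intro h
    unfold sequenceExists at h
    split at h
    · simp at h
    · rw [foldl_or_any] at h
      simp only [Bool.false_or, List.any_eq_true] at h
      obtain ⟨i, hi, hp⟩ := h
      rw [PySem.List.mem_pyRange_one] at hi
      obtain ⟨hi0, hilt⟩ := hi
      split at hp
      · have hslice : seq = PySem.List.slice m (some i) (some (i + (seq.length : Int))) := by
          simpa using hp
        obtain ⟨k, rfl⟩ := Int.eq_ofNat_of_zero_le hi0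
        refine ⟨k, ?_, ?_⟩
        · exact_mod_cast hilt
        · rw [PySem.List.slice_toNat _ (by positivity) (by positivity)] at hslice
          have : (((k : Int) + (seq.length : Int)).toNat - ((k : Int)).toNat) = seq.length := by
            omega
          rw [this] at hslice
          simp only [Int.toNat_natCast] at hslice
          simpa [hseq] using hslice.symm
      · simp at hp
  · rintro ⟨k, hk, hwin⟩
    have hlen : seq.length + k ≤ m.length := by
      have := take_drop_len (m := m) (k := k) hwin
      simp [hseq]
      omega
    unfold sequenceExists
    rw [if_neg (by omega)]
    rw [foldl_or_any]
    simp only [Bool.false_or, List.any_eq_true]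
    refine ⟨(k : Int), ?_, ?_⟩
    · rw [PySem.List.mem_pyRange_one]
      constructor
      · positivity
      · exact_mod_cast hk
    · have hhead : m[k]? = some s := by
        have hd : m.drop k ≠ [] := by
          intro hnil
          rw [hnil] at hwin
          simp at hwin
        have : (m.drop k).head? = some s := by
          cases hdk : m.drop k with
          | nil => exact absurd hdk hd
          | cons x xs =>
            rw [hdk] at hwin
            simp [hseq, List.take_succ_cons] at hwin
            simp [hwin.1]
        rw [List.head?_drop] at this
        exact this
      have hget : PySem.List.pyGet? m (k : Int) = some s := by
        rw [PySem.List.pyGet?_natCast]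
        exact hhead
      rw [if_pos]
      · rw [PySem.List.slice_toNat _ (by positivity) (by positivity)]
        have harith : (((k : Int) + (seq.length : Int)).toNat - ((k : Int)).toNat) = seq.length := by
          omega
        rw [harith]
        simp only [Int.toNat_natCast]
        simp [hseq] at hwin ⊢
        exact hwin.symm ▸ rfl
      · rw [hget, hseq]
        simp [PySem.List.pyGet?, PySem.List.pyIdx?]

-- B = true ↔ some window matches (seq nonempty)
lemma B_iff (m : List Int) (s : Int) (ss : List Int) :
    seqAltLoop (s :: ss) m = true ↔
      ∃ k : Nat, k < m.length ∧ (m.drop k).take (ss.length + 1) = s :: ss := by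
  induction m with
  | nil =>
    unfold seqAltLoop
    simp
  | cons a t ih =>
    simp only [seqAltLoop]
    by_cases hlen : (s :: ss).length ≤ t.length + 1
    · rw [if_pos hlen]
      by_cases hpre : (a :: t).take (s :: ss).length == (s :: ss)
      · rw [if_pos hpre]
        simp only [true_iff]
        exact ⟨0, by simp, by simpa using (beq_iff_eq.mp hpre)⟩
      · rw [if_neg hpre]
        rw [ih]
        constructor
        · rintro ⟨k, hk, hw⟩
          exact ⟨k + 1, by simp; omega, by simpa using hw⟩
        · rintro ⟨k, hk, hw⟩
          cases k with
          | zero =>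
            exfalso
            apply hpre
            simp at hw
            simp [hw]
          | succ k' =>
            refine ⟨k', by simp at hk; omega, by simpa using hw⟩
    · rw [if_neg hlen]
      simp only [Bool.false_eq_true, false_iff]
      rintro ⟨k, hk, hw⟩
      have := take_drop_len (m := a :: t) (k := k) (by simpa using hw)
      simp at this hlen
      omega

-- ===== VERDICT (by name: the statement is the Claim_ definition above) =====
theorem sequenceExists_spec : Claim_equal_sequenceExists := by
  intro main seq _ hpre
  unfold Spec_sequenceExists sequenceExists_alt
  cases seq with
  | nil => exact absurd rfl hpre
  | cons s ss =>
    have hA := A_iff main s ss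
    have hB := B_iff main s ss
    have h := hA.trans hB.symm
    cases hA' : sequenceExists main (s :: ss) with
    | true => exact (h.mp hA').symm
    | false =>
      cases hB' : seqAltLoop (s :: ss) main with
      | false => rfl
      | true => exact absurd (hA' ▸ h.mpr hB') (by simp)
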